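-- pv_equiv track=rewrite | github.com/fakdora/leetcode | amz/find_nums1_lower_than_or_equal_to_nums2.py | find_nums1_lower_than_or_equal_to_nums2
-- ===== SOURCE A (Python) =====
-- def find_nums1_lower_than_or_equal_to_nums2(nums1, nums2):
--     i = 0
--     j = 0
--     total = 0
--
--     nums1 = sorted(nums1)
--     nums2 = sorted(nums2)
--
--     while i < len(nums1):
--         num1 = nums1[i]
--         while j < len(nums2):
--             num2 = nums2[j]
--             j+=1  # notice it always increments or infinite loop
--             if num1 <= num2:
--                 total += 1
--                 break
--         i+=1
--     return total
-- ===== SOURCE B (Python) =====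
-- def find_nums1_lower_than_or_equal_to_nums2(nums1, nums2):
--     # Maximum-matching count = the largest k such that the k smallest elements
--     # of nums1 can be matched, in order, to the k largest elements of nums2
--     # (a[i] <= b[m-k+i] for all i < k). Feasibility is monotone decreasing in k,
--     # so binary search on k.
--     a = sorted(nums1)
--     b = sorted(nums2)
--     m = len(b)
--
--     def feasible(k):
--         return all(a[i] <= b[m - k + i] for i in range(k))
--
--     lo, hi = 0, min(len(a), m)
--     while lo < hi:
--         mid = (lo + hi + 1) // 2
--         if feasible(mid):
--             lo = mid
--         else:
--             hi = mid - 1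
--     return lo
-- ===== Notes on version B (the rewrite author's own statement) =====
-- stated objective: alternative
-- what changed: Replaces A's greedy two-pointer merge over the sorted lists by a binary search on the answer k, using the feasibility check that the k smallest nums1 elements are pointwise <= the k largest nums2 elements.
import Mathlib
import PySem

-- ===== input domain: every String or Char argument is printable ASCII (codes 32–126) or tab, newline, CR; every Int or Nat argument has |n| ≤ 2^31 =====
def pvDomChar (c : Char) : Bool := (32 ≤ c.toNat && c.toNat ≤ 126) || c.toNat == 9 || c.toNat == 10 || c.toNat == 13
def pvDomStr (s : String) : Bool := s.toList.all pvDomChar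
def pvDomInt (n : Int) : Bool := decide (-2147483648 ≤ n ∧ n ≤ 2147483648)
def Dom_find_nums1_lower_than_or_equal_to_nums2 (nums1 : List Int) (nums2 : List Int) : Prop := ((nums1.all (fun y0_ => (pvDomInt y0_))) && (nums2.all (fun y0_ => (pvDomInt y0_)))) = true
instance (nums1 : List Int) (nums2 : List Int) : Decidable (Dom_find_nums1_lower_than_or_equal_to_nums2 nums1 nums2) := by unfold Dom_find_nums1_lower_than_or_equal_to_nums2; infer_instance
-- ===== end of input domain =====

-- B replaces A's greedy merge by a binary search on the answer k with a
-- pointwise feasibility check (alternative algorithm; same asymptotic cost).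

-- ===== PORT A =====
-- Port of A: sort both lists, outer loop over nums1 indices with an inner
-- while over a persistent pointer j into nums2 (break on the first match).
def pvAInner (num1 : Int) (b : List Int) (j : Nat) (total : Int) : Nat × Int :=
  if h : j < b.length then
    let num2 := b[j]
    if num1 ≤ num2 then (j + 1, total + 1) else pvAInner num1 b (j + 1) total
  else (j, total)
termination_by b.length - j

def pvAOuter (a b : List Int) (i j : Nat) (total : Int) : Int :=
  if h : i < a.length then
    let num1 := a[i]
    let r := pvAInner num1 b j total
    pvAOuter a b (i + 1) r.1 r.2
  else total
termination_by a.length - i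

def find_nums1_lower_than_or_equal_to_nums2 (nums1 : List Int) (nums2 : List Int) : Int :=
  pvAOuter (PySem.List.sorted nums1 (fun x => x) false) (PySem.List.sorted nums2 (fun x => x) false) 0 0 0

-- ===== PORT B =====
-- Port of B: feasible(k) = all(a[i] <= b[m-k+i] for i in range(k)).
def pvFeasible (a b : List Int) (k : Nat) : Bool :=
  (List.range k).all (fun i => a.getD i 0 ≤ b.getD (b.length - k + i) 0)

-- Port of B's binary-search loop on [lo, hi].
def pvSearch (a b : List Int) (lo hi : Nat) : Nat :=
  if lo < hi then
    if pvFeasible a b ((lo + hi + 1) / 2) then pvSearch a b ((lo + hi + 1) / 2) hi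
    else pvSearch a b lo ((lo + hi + 1) / 2 - 1)
  else lo
termination_by hi - lo
decreasing_by all_goals omega

def find_nums1_lower_than_or_equal_to_nums2_alt (nums1 : List Int) (nums2 : List Int) : Int :=
  let a := PySem.List.sorted nums1 (fun x => x) false
  let b := PySem.List.sorted nums2 (fun x => x) false
  (pvSearch a b 0 (min a.length b.length) : Int)

-- ===== PRECONDITION & SPEC =====
def Spec_find_nums1_lower_than_or_equal_to_nums2 (nums1 : List Int) (nums2 : List Int) (out : Int) : Prop := out = find_nums1_lower_than_or_equal_to_nums2_alt nums1 nums2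
instance (nums1 : List Int) (nums2 : List Int) (out : Int) : Decidable (Spec_find_nums1_lower_than_or_equal_to_nums2 nums1 nums2 out) := by unfold Spec_find_nums1_lower_than_or_equal_to_nums2; infer_instance

-- ===== CLAIM (what is proved, stated in full; the proofs are below) =====
def Claim_equal_find_nums1_lower_than_or_equal_to_nums2 : Prop := ∀ (nums1 : List Int) (nums2 : List Int), Dom_find_nums1_lower_than_or_equal_to_nums2 nums1 nums2 → Spec_find_nums1_lower_than_or_equal_to_nums2 nums1 nums2 (find_nums1_lower_than_or_equal_to_nums2 nums1 nums2)

-- ===== LEMMAS AND PROOFS =====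

-- The greedy two-pointer merge count A computes (reference form).
def pvMerge : List Int → List Int → Nat
  | [], _ => 0
  | _ :: _, [] => 0
  | x :: xs, y :: ys => if x ≤ y then 1 + pvMerge xs ys else pvMerge (x :: xs) ys

theorem pvMerge_nil_right (a : List Int) : pvMerge a [] = 0 := by
  cases a <;> simp [pvMerge]

-- Feasibility (Prop form): the k smallest of a match the k largest of b.
def pvFeas (a b : List Int) (k : Nat) : Prop :=
  k ≤ a.length ∧ k ≤ b.length ∧
    ∀ i, i < k → a.getD i 0 ≤ b.getD (b.length - k + i) 0

theorem pvFeas_zero (a b : List Int) : pvFeas a b 0 :=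
  ⟨Nat.zero_le _, Nat.zero_le _, fun i hi => absurd hi (by omega)⟩

theorem pvAInner_merge (a b : List Int) (i j : Nat) (t : Int) (hi : i < a.length) :
    (pvAInner a[i] b j t).2 + (pvMerge (a.drop (i + 1)) (b.drop (pvAInner a[i] b j t).1) : Int)
      = t + pvMerge (a.drop i) (b.drop j) := by
  have hd : a.drop i = a[i] :: a.drop (i + 1) := List.drop_eq_getElem_cons hi
  induction hn : b.length - j generalizing j with
  | zero =>
    have hj : ¬ j < b.length := by omega
    rw [pvAInner, dif_neg hj]
    have : b.drop j = [] := List.drop_eq_nil_of_le (by omega)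
    simp [this, pvMerge_nil_right]
  | succ n ih =>
    have hj : j < b.length := by omega
    have hdb : b.drop j = b[j] :: b.drop (j + 1) := List.drop_eq_getElem_cons hj
    rw [pvAInner, dif_pos hj]
    by_cases hle : a[i] ≤ b[j]
    · simp only [hle, if_pos, hd, hdb, pvMerge]
      push_cast
      ring
    · simp only [hle, if_neg, not_false_iff]
      rw [ih (j + 1) (by omega)]
      rw [hdb, hd, pvMerge, if_neg hle, ← hd]

theorem pvAOuter_merge (a b : List Int) (i j : Nat) (t : Int) :
    pvAOuter a b i j t = t + pvMerge (a.drop i) (b.drop j) := by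
  induction hn : a.length - i generalizing i j t with
  | zero =>
    have hi : ¬ i < a.length := by omega
    rw [pvAOuter, dif_neg hi]
    have : a.drop i = [] := List.drop_eq_nil_of_le (by omega)
    simp [this, pvMerge]
  | succ n ih =>
    have hi : i < a.length := by omega
    rw [pvAOuter, dif_pos hi]
    rw [ih (i + 1) _ _ (by omega)]
    have := pvAInner_merge a b i j t hi
    omega

-- Sorted lists are monotone under getD on in-range indices.
theorem pvSorted_getD_mono (b : List Int)
    (hb : b.Pairwise (fun u v : Int => u ≤ v)) (p q : Nat)
    (hpq : p ≤ q) (hq : q < b.length) :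
    b.getD p 0 ≤ b.getD q 0 := by
  rcases Nat.lt_or_ge p q with h | h
  · rw [List.getD_eq_getElem b 0 (by omega), List.getD_eq_getElem b 0 hq]
    exact (List.pairwise_iff_getElem.mp hb) p q (by omega) hq h
  · have : p = q := by omega
    subst this
    exact le_refl _

-- Greedy achieves a feasible matching.
theorem pvMerge_feas (a b : List Int)
    (hb : b.Pairwise (fun u v : Int => u ≤ v)) :
    pvFeas a b (pvMerge a b) := by
  induction b generalizing a with
  | nil => rw [pvMerge_nil_right]; exact pvFeas_zero a []
  | cons y ys ih =>
    cases a with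
    | nil => exact pvFeas_zero [] (y :: ys)
    | cons x xs =>
      rw [List.pairwise_cons] at hb
      by_cases hle : x ≤ y
      · rw [pvMerge, if_pos hle]
        obtain ⟨h1, h2, h3⟩ := ih xs hb.2
        refine ⟨by simp; omega, by simp; omega, ?_⟩
        intro i hik
        cases i with
        | zero =>
          simp only [List.getD_cons_zero]
          have hidx : (y :: ys).length - (1 + pvMerge xs ys) + 0 =
              ys.length - pvMerge xs ys := by simp; omega
          rw [hidx]
          rcases Nat.lt_or_ge (pvMerge xs ys) ys.length with hlt | hge
          · have h1' : ys.length - pvMerge xs ys = (ys.length - pvMerge xs ys - 1) + 1 := by omega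
            rw [h1', List.getD_cons_succ]
            have hmem : ys.getD (ys.length - pvMerge xs ys - 1) 0 ∈ ys := by
              rw [List.getD_eq_getElem ys 0 (by omega)]
              exact List.getElem_mem _
            exact le_trans hle (hb.1 _ hmem)
          · have : ys.length - pvMerge xs ys = 0 := by omega
            rw [this, List.getD_cons_zero]
            exact hle
        | succ i' =>
          simp only [List.getD_cons_succ]
          have hidx : (y :: ys).length - (1 + pvMerge xs ys) + (i' + 1) =
              (ys.length - pvMerge xs ys + i') + 1 := by simp; omega
          rw [hidx, List.getD_cons_succ]
          exact h3 i' (by omega)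
      · rw [pvMerge, if_neg hle]
        obtain ⟨h1, h2, h3⟩ := ih (x :: xs) hb.2
        refine ⟨h1, by simp; omega, ?_⟩
        intro i hik
        have hidx : (y :: ys).length - pvMerge (x :: xs) ys + i =
            (ys.length - pvMerge (x :: xs) ys + i) + 1 := by simp; omega
        rw [hidx, List.getD_cons_succ]
        exact h3 i hik

-- Greedy is maximal among feasible sizes.
theorem pvFeas_le_merge (a b : List Int) (k : Nat) (h : pvFeas a b k) :
    k ≤ pvMerge a b := by
  induction b generalizing a k with
  | nil => have := h.2.1; simp at this; omega
  | cons y ys ih =>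
    cases a with
    | nil => have := h.1; simp at this; omega
    | cons x xs =>
      obtain ⟨h1, h2, h3⟩ := h
      by_cases hle : x ≤ y
      · rw [pvMerge, if_pos hle]
        cases k with
        | zero => omega
        | succ k' =>
          have hk'ys : k' ≤ ys.length := by simp at h2; omega
          have : k' ≤ pvMerge xs ys := by
            refine ih xs k' ⟨by simp at h1; omega, hk'ys, ?_⟩
            intro i hik
            have := h3 (i + 1) (by omega)
            rw [List.getD_cons_succ] at this
            have hidx : (y :: ys).length - (k' + 1) + (i + 1) =
                (ys.length - k' + i) + 1 := by simp; omega
            rw [hidx, List.getD_cons_succ] at this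
            exact this
          omega
      · rw [pvMerge, if_neg hle]
        have hkys : k ≤ ys.length := by
          by_contra hgt
          have hk : k = ys.length + 1 := by simp at h2; omega
          have := h3 0 (by omega)
          have hidx : (y :: ys).length - k + 0 = 0 := by simp; omega
          rw [hidx] at this
          simp at this
          exact hle this
        refine ih (x :: xs) k ⟨h1, hkys, ?_⟩
        intro i hik
        have := h3 i hik
        have hidx : (y :: ys).length - k + i = (ys.length - k + i) + 1 := by
          simp; omega
        rw [hidx, List.getD_cons_succ] at this
        exact this

-- Feasibility is downward monotone (b sorted).
theorem pvFeas_mono (a b : List Int)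
    (hb : b.Pairwise (fun u v : Int => u ≤ v)) (j k : Nat)
    (hjk : j ≤ k) (h : pvFeas a b k) : pvFeas a b j := by
  obtain ⟨h1, h2, h3⟩ := h
  refine ⟨by omega, by omega, ?_⟩
  intro i hij
  exact le_trans (h3 i (by omega))
    (pvSorted_getD_mono b hb _ _ (by omega) (by omega))

-- The Bool check agrees with the Prop on in-range k.
theorem pvFeasible_iff (a b : List Int) (k : Nat)
    (hka : k ≤ a.length) (hkb : k ≤ b.length) :
    pvFeasible a b k = true ↔ pvFeas a b k := by
  unfold pvFeasible pvFeas
  simp only [List.all_eq_true, List.mem_range, decide_eq_true_eq]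
  constructor
  · intro h
    exact ⟨hka, hkb, h⟩
  · intro h
    exact h.2.2

-- Binary search returns the greedy count.
theorem pvSearch_eq (a b : List Int)
    (hb : b.Pairwise (fun u v : Int => u ≤ v)) (lo hi : Nat)
    (hlo : lo ≤ pvMerge a b) (hhi : pvMerge a b ≤ hi)
    (hhia : hi ≤ a.length) (hhib : hi ≤ b.length) :
    pvSearch a b lo hi = pvMerge a b := by
  induction hn : hi - lo using Nat.strong_induction_on generalizing lo hi with
  | _ n ih =>
    rw [pvSearch]
    by_cases hlh : lo < hi
    · rw [if_pos hlh]
      by_cases hf : pvFeasible a b ((lo + hi + 1) / 2)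
      · rw [if_pos hf]
        have hfe : pvFeas a b ((lo + hi + 1) / 2) :=
          (pvFeasible_iff a b _ (by omega) (by omega)).mp hf
        have hle := pvFeas_le_merge a b _ hfe
        exact ih (hi - (lo + hi + 1) / 2) (by omega) _ _ hle hhi hhia hhib rfl
      · rw [if_neg hf]
        have hub : pvMerge a b ≤ (lo + hi + 1) / 2 - 1 := by
          by_contra hgt
          have hmid : (lo + hi + 1) / 2 ≤ pvMerge a b := by omega
          have : pvFeas a b ((lo + hi + 1) / 2) :=
            pvFeas_mono a b hb _ _ hmid (pvMerge_feas a b hb)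
          exact hf ((pvFeasible_iff a b _ (by omega) (by omega)).mpr this)
        exact ih ((lo + hi + 1) / 2 - 1 - lo) (by omega) _ _ hlo hub
          (by omega) (by omega) rfl
    · rw [if_neg hlh]
      omega

-- ===== VERDICT (by name: the statement is the Claim_ definition above) =====
theorem find_nums1_lower_than_or_equal_to_nums2_spec : Claim_equal_find_nums1_lower_than_or_equal_to_nums2 := by
  intro nums1 nums2 _
  unfold Spec_find_nums1_lower_than_or_equal_to_nums2
  unfold find_nums1_lower_than_or_equal_to_nums2 find_nums1_lower_than_or_equal_to_nums2_alt
  set a := PySem.List.sorted nums1 (fun x => x) false with ha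
  set b := PySem.List.sorted nums2 (fun x => x) false with hbdef
  have hb : b.Pairwise (fun u v : Int => u ≤ v) := PySem.List.sorted_pairwise nums2 (fun x => x)
  have hfe := pvMerge_feas a b hb
  rw [pvAOuter_merge]
  show (0:Int) + (pvMerge (a.drop 0) (b.drop 0) : Int) = (pvSearch a b 0 (min a.length b.length) : Int)
  rw [pvSearch_eq a b hb 0 (min a.length b.length) (Nat.zero_le _)
    (by exact le_min hfe.1 hfe.2.1) (Nat.min_le_left _ _) (Nat.min_le_right _ _)]
  simp
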